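-- pv_equiv track=rewrite | github.com/janparaniak/add_dns | add_dns.py | reorder_mappings
-- ===== SOURCE A (Python) =====
-- def reorder_mappings(mappings):
--     preferred = []
--     others = []
--     for m in mappings:
--         acct_id = m.get("account_id")
--         if acct_id == "646253092271" or acct_id == "727712672144":
--             preferred.append(m)
--         else:
--             others.append(m)
--     # sort so 646253092271 is index 0, 727712672144 is index 1
--     preferred.sort(key=lambda x: 0 if x.get("account_id") == "646253092271" else 1)
--     return preferred + others
-- ===== SOURCE B (Python) =====
-- def reorder_mappings(mappings):
--     return (
--         [m for m in mappings if m.get("account_id") == "646253092271"]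
--         + [m for m in mappings if m.get("account_id") == "727712672144"]
--         + [m for m in mappings
--            if m.get("account_id") not in ("646253092271", "727712672144")]
--     )
-- ===== Notes on version B (the rewrite author's own statement) =====
-- stated objective: simpler
-- what changed: Replaces the accumulate-then-stable-sort loop with three declarative filter passes (646 matches, 727 matches, the rest) concatenated, eliminating buckets and the sort call.
import Mathlib
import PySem

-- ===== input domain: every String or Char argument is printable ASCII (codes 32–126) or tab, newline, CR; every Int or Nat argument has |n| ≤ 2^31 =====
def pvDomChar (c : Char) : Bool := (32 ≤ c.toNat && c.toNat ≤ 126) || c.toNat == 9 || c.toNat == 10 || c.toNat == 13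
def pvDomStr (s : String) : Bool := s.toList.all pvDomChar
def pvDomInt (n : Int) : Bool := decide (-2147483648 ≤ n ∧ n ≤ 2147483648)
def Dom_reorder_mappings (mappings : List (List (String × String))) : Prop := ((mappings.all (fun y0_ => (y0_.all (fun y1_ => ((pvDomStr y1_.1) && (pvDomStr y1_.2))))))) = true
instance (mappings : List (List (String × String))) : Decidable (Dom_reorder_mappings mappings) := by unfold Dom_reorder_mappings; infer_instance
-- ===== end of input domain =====

-- B replaces A's accumulate-then-stable-sort loop with three declarative filter passes concatenated: simpler, same return value.

-- m.get("account_id"): first-match lookup in the association list (Python dict get)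
def pvGetAcct (m : List (String × String)) : Option String := m.lookup "account_id"

-- ===== PORT A =====
def reorder_mappings (mappings : List (List (String × String))) : List (List (String × String)) :=
  let res := mappings.foldl
    (fun (acc : List (List (String × String)) × List (List (String × String))) m =>
      let acct_id := pvGetAcct m
      if acct_id = some "646253092271" ∨ acct_id = some "727712672144" then
        (acc.1 ++ [m], acc.2)
      else
        (acc.1, acc.2 ++ [m]))
    ([], [])
  PySem.List.sorted res.1 (fun x => if pvGetAcct x = some "646253092271" then (0 : Int) else 1) false ++ res.2

-- ===== PORT B =====
def reorder_mappings_alt (mappings : List (List (String × String))) : List (List (String × String)) :=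
  mappings.filter (fun m => pvGetAcct m = some "646253092271")
    ++ mappings.filter (fun m => pvGetAcct m = some "727712672144")
    ++ mappings.filter (fun m => pvGetAcct m ∉ [some "646253092271", some "727712672144"])

-- ===== PRECONDITION & SPEC =====
def Spec_reorder_mappings (mappings : List (List (String × String))) (out : List (List (String × String))) : Prop := out = reorder_mappings_alt mappings
instance (mappings : List (List (String × String))) (out : List (List (String × String))) : Decidable (Spec_reorder_mappings mappings out) := by unfold Spec_reorder_mappings; infer_instance

-- ===== CLAIM (what is proved, stated in full; the proofs are below) =====
def Claim_equal_reorder_mappings : Prop := ∀ (mappings : List (List (String × String))), Dom_reorder_mappings mappings → Spec_reorder_mappings mappings (reorder_mappings mappings)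

-- ===== LEMMAS AND PROOFS =====

-- abbreviations used only in the proofs
def pvKey (x : List (String × String)) : Int := if pvGetAcct x = some "646253092271" then 0 else 1
def pvBef (x y : List (String × String)) : Bool := decide (pvKey x < pvKey y)

theorem pvInsertBy_ge {α : Type} (bef : α → α → Bool) (x : α) (l : List α)
    (h : ∀ y ∈ l, bef x y = false) :
    PySem.List.insertBy bef x l = l ++ [x] := by
  induction l with
  | nil => simp [PySem.List.insertBy]
  | cons y ys ih =>
    have hy : bef x y = false := h y (List.mem_cons_self)
    simp [PySem.List.insertBy, hy, ih (fun z hz => h z (List.mem_cons_of_mem _ hz))]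

theorem pvInsertBy_zero (x : List (String × String)) (zs os : List (List (String × String)))
    (hx : pvKey x = 0)
    (hz : ∀ z ∈ zs, pvKey z = 0) (ho : ∀ o ∈ os, pvKey o = 1) :
    PySem.List.insertBy pvBef x (zs ++ os) = zs ++ x :: os := by
  induction zs with
  | nil =>
    cases os with
    | nil => simp [PySem.List.insertBy]
    | cons o os' =>
      have : pvBef x o = true := by
        simp [pvBef, hx, ho o (by simp)]
      simp [PySem.List.insertBy, this]
  | cons z zs' ih =>
    have hz0 : pvBef x z = false := by
      simp [pvBef, hx, hz z (List.mem_cons_self)]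
    simp [PySem.List.insertBy, hz0, ih (fun w hw => hz w (List.mem_cons_of_mem _ hw))]

theorem pvSorted_aux (xs : List (List (String × String))) :
    ∀ (zs os : List (List (String × String))),
    (∀ z ∈ zs, pvKey z = 0) → (∀ o ∈ os, pvKey o = 1) →
    xs.foldl (fun acc x => PySem.List.insertBy pvBef x acc) (zs ++ os)
      = (zs ++ xs.filter (fun x => pvKey x = 0)) ++ (os ++ xs.filter (fun x => ¬ pvKey x = 0)) := by
  induction xs with
  | nil => intro zs os _ _; simp
  | cons x xs' ih =>
    intro zs os hz ho
    by_cases hx : pvKey x = 0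
    · have step : PySem.List.insertBy pvBef x (zs ++ os) = (zs ++ [x]) ++ os := by
        rw [pvInsertBy_zero x zs os hx hz ho]; simp
      simp only [List.foldl_cons, step]
      rw [ih (zs ++ [x]) os
            (by intro z hz'; rcases List.mem_append.1 hz' with h | h
                · exact hz z h
                · simp at h; simpa [h] using hx)
            ho]
      simp [List.filter_cons, hx]
    · have hx1 : pvKey x = 1 := by unfold pvKey at hx ⊢; split_ifs at hx ⊢ <;> simp_all
      have step : PySem.List.insertBy pvBef x (zs ++ os) = zs ++ (os ++ [x]) := by
        rw [show zs ++ (os ++ [x]) = (zs ++ os) ++ [x] by simp]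
        apply pvInsertBy_ge
        intro y hy
        rcases List.mem_append.1 hy with h | h
        · simp [pvBef, hx1, hz y h]
        · simp [pvBef, hx1, ho y h]
      simp only [List.foldl_cons, step]
      rw [ih zs (os ++ [x]) hz
            (by intro o hoo; rcases List.mem_append.1 hoo with h | h
                · exact ho o h
                · simp at h; simpa [h] using hx1)]
      simp [List.filter_cons, hx]

theorem pvSorted_01 (xs : List (List (String × String))) :
    PySem.List.sorted xs pvKey false
      = xs.filter (fun x => pvKey x = 0) ++ xs.filter (fun x => ¬ pvKey x = 0) := by
  have := pvSorted_aux xs [] [] (by simp) (by simp)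
  simpa [PySem.List.sorted, pvBef] using this

-- A's fold as filters
theorem pvFoldA (xs : List (List (String × String))) :
    ∀ pr ot, xs.foldl
      (fun (acc : List (List (String × String)) × List (List (String × String))) m =>
        let acct_id := pvGetAcct m
        if acct_id = some "646253092271" ∨ acct_id = some "727712672144" then
          (acc.1 ++ [m], acc.2)
        else
          (acc.1, acc.2 ++ [m]))
      (pr, ot)
      = (pr ++ xs.filter (fun m => pvGetAcct m = some "646253092271" ∨ pvGetAcct m = some "727712672144"),
         ot ++ xs.filter (fun m => ¬ (pvGetAcct m = some "646253092271" ∨ pvGetAcct m = some "727712672144"))) := by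
  induction xs with
  | nil => intro pr ot; simp
  | cons x xs' ih =>
    intro pr ot
    by_cases h : pvGetAcct x = some "646253092271" ∨ pvGetAcct x = some "727712672144" <;>
      · simp [List.filter_cons, h, ih]
        try tauto

theorem reorder_spec_core (mappings : List (List (String × String))) :
    reorder_mappings mappings = reorder_mappings_alt mappings := by
  unfold reorder_mappings reorder_mappings_alt
  rw [pvFoldA]
  simp only [List.nil_append]
  rw [show (fun (x : List (String × String)) => if pvGetAcct x = some "646253092271" then (0:Int) else 1) = pvKey from rfl]
  rw [pvSorted_01]
  rw [List.filter_filter, List.filter_filter]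
  have e1 : List.filter
      (fun a => decide (pvKey a = 0) && decide (pvGetAcct a = some "646253092271" ∨ pvGetAcct a = some "727712672144"))
      mappings
      = List.filter (fun m => decide (pvGetAcct m = some "646253092271")) mappings := by
    apply List.filter_congr
    intro m _
    by_cases h : pvGetAcct m = some "646253092271" <;> simp [pvKey, h]
  have e2 : List.filter
      (fun a => decide ¬pvKey a = 0 && decide (pvGetAcct a = some "646253092271" ∨ pvGetAcct a = some "727712672144"))
      mappings
      = List.filter (fun m => decide (pvGetAcct m = some "727712672144")) mappings := by
    apply List.filter_congr
    intro m _
    by_cases h1 : pvGetAcct m = some "646253092271" <;>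
      by_cases h2 : pvGetAcct m = some "727712672144" <;>
        simp_all [pvKey]
  have e3 : List.filter
      (fun m => decide ¬(pvGetAcct m = some "646253092271" ∨ pvGetAcct m = some "727712672144")) mappings
      = List.filter (fun m => decide (pvGetAcct m ∉ [some "646253092271", some "727712672144"])) mappings := by
    apply List.filter_congr
    intro m _
    by_cases h1 : pvGetAcct m = some "646253092271" <;>
      by_cases h2 : pvGetAcct m = some "727712672144" <;>
        simp [h1, h2]
  rw [e1, e2, e3, List.append_assoc]

-- ===== VERDICT (by name: the statement is the Claim_ definition above) =====
theorem reorder_mappings_spec : Claim_equal_reorder_mappings := by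
  intro mappings _
  exact reorder_spec_core mappings
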